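/-
  jsmn_s.bin, `jsmn_parse`: what the three CALLING cases of the switch share ('{' '[' → jsmn_alloc_token, '"' → jsmn_parse_string,
  a primitive's first character → jsmn_parse_primitive). The S twin of Prog/Jsmn/D/ParseCallLemmas.lean. Everything here is derived
  from `FrameCore` (Prog/Jsmn/S/ParseInv.lean):
    core_step                a step inside the loop body (a call, stores into the parser / the token array) keeps the frame
    frame_next, r12_inc      the end of a `.next` path: `Frame` of the model's next state; `count++` in r12d
    region_callee, env_callee   jsmn_parse's data regions are data regions of the function it calls
    toks_frame, toksArg_frame   the token array (20-byte records) through stores elsewhere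
    bump_tokens              `tokens[j].size++` (cdqe ; lea ; lea ; mov ; add ; mov) gives the model's `tokUpd`
    bumpSuper_m1 / _some     what `Jsmn.bumpSuper` is in the two cases
-/
import Prog.Jsmn.S.ParseLemmas

namespace X86
namespace J6
namespace S
namespace A2
open X86.User (CodeAt RegsKept Span FlagsOK Layout toNat_add_ofNat toNat_ofNat_lt' add_ofNat_add)
open Jsmn JsmnSBytes

set_option maxRecDepth 100000
set_option maxHeartbeats 4000000
set_option linter.unusedSimpArgs false
set_option linter.unusedVariables false

variable {c : PCtx} {n : User.Layout} {v0 v : User.State} {p : Parser} {toks : Option Tokens}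

/-- **A step inside the loop body keeps the frame**: the five registers that hold the arguments are the same, memory changed only below the frame
(the callee's stack window, at most 32 bytes, and the return address pushed by the `call`: sp0-96 … sp0-56) and in the two data windows; the new
parser / tokens are given. -/
theorem core_step {v' : User.State} {p' : Parser} {toks' : Option Tokens} (h : FrameCore c n v0 v p toks)
    (hrsp : v'.reg .rsp = v.reg .rsp) (hrbp : v'.reg .rbp = v.reg .rbp) (hr15 : v'.reg .r15 = v.reg .r15) (hr14 : v'.reg .r14 = v.reg .r14)
    (hr13 : v'.reg .r13 = v.reg .r13)
    (hsame : SameOutside v.mem v'.mem (((v0.reg .rsp).toNat - 96, (v0.reg .rsp).toNat - 56) :: dataWins c.pa c.tb c.tlen))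
    (hparser : ParserAt v'.mem c.pa p') (htoks : ToksArg Config.strictLinks v'.mem c.tb c.numTokens toks') (hnull : toks' = none ↔ toks = none) :
    FrameCore c n v0 v' p' toks' := by
  have hp := h.entry.pre
  have hs0 := h.same
  have hW := hp.toksW
  v3_open hp.call hp.env.parserR hW
  unfold PCtx.tlen dataWins at hsame hs0
  j6_bin
  have h1 := h.ntok; have h2 := h.sv15; have h3 := h.sv14; have h4 := h.sv13; have h5 := h.sv12; have h6 := h.svbp; have h7 := h.svbx
  have h8 := h.retA
  refine ⟨h.entry, hrsp.trans h.rsp, hrbp.trans h.rbp, hr15.trans h.r15, hr14.trans h.r14, hr13.trans h.r13, by v3_frame h1, by v3_frame h2,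
    by v3_frame h3, by v3_frame h4, by v3_frame h5, by v3_frame h6, by v3_frame h7, by v3_frame h8, ?_, hparser, htoks, hnull.trans h.null⟩
  unfold PCtx.tlen dataWins
  refine hs0.trans (hsame.mono ?_)
  intro a ha
  simp only [outside_cons, outside_nil, and_true] at ha ⊢
  omega

/-- `count++` in r12d. -/
theorem r12_inc (x : Int) : Word.low .w32 (UInt64.ofNat (u32 x) + 1) = UInt64.ofNat (u32 (i32 (x + 1))) := by
  have := u32_lt x
  have h2 : u32 (i32 (x + 1)) = (u32 x + 1) % 4294967296 := by unfold u32 i32; omega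
  rw [h2]
  apply UInt64.toNat_inj.mp
  v3_omega

/-- **The end of a `.next` path**: `Frame` for the model's next state from its `FrameCore` and the count register; the invariant and the range
of the count come from `SafeFacts.body`. -/
theorem frame_next {v' : User.State} {s s' : St} {fuel : Nat} {ch : UInt8} (sf : SafeFacts Config.strictLinks) (hfr : Frame c n v0 v s)
    (hb : body Config.strictLinks c.js fuel c.numTokens s ch = some (.next s')) (hcore : FrameCore c n v0 v' s'.p s'.toks)
    (hr12 : v'.reg .r12 = UInt64.ofNat (u32 s'.count)) : Frame c n v0 v' s' := by
  obtain ⟨hi, hc, _⟩ := (sf.body c.js fuel c.numTokens s ch hfr.inv hfr.cnt).1 s' hb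
  exact ⟨hcore, hr12, hc, hi⟩

/-- A data region of jsmn_parse is a data region of a function it calls (whose stack window, at most 32 bytes, lies inside jsmn_parse's 96). -/
theorem region_callee {b : Bin} {v1 : User.State} {use : Nat} {a : Word} {len : Nat} (h : Region b n v0 96 a len)
    (hrsp : v1.reg .rsp = v0.reg .rsp - 64) (hsp : 96 ≤ (v0.reg .rsp).toNat) (huse : use ≤ 32) : Region b n v1 use a len := by
  refine ⟨h.lo, h.hi, h.img, ?_⟩
  have := h.stk
  rw [hrsp]
  v3_omega

/-- The three buffers, as the callee sees them. -/
theorem env_callee {b : Bin} {v1 : User.State} {use : Nat} {pa jsA tb : Word} {len tlen : Nat} (h : Env b n v0 96 pa jsA len tb tlen)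
    (hrsp : v1.reg .rsp = v0.reg .rsp - 64) (hsp : 96 ≤ (v0.reg .rsp).toNat) (huse : use ≤ 32) : Env b n v1 use pa jsA len tb tlen :=
  ⟨region_callee h.parserR hrsp hsp huse, region_callee h.jsR hrsp hsp huse, h.toksR.imp_right fun hR => region_callee hR hrsp hsp huse, h.parserJs, h.parserToks,
    h.jsToks⟩

/-- The token array (20-byte records, `k` of them) through stores elsewhere: `A2.toks_frame h hlen (by v3_eqon) (by v3_omega)`. -/
theorem toks_frame {μ ν : User.Mem} {tb : Word} {ts : Tokens} {k : Nat} (h : TokensAt Config.strictLinks μ tb ts) (hl : ts.length = k)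
    (he : User.Mem.EqOn tb.toNat (tb.toNat + 20 * k) μ ν) (hlt : tb.toNat + 20 * k < 2 ^ 64) : TokensAt Config.strictLinks ν tb ts :=
  h.frame (by rw [tokSize_strictLinks, hl]; exact he) (by rw [tokSize_strictLinks, hl]; exact hlt)

/-- The `tokens` argument (NULL, or the array) through stores elsewhere. -/
theorem toksArg_frame {μ ν : User.Mem} {tb : Word} {k : Nat} {toks : Option Tokens} (h : ToksArg Config.strictLinks μ tb k toks)
    (he : User.Mem.EqOn tb.toNat (tb.toNat + toksBytes Config.strictLinks k toks) μ ν) (hlt : tb.toNat + toksBytes Config.strictLinks k toks < 2 ^ 64) :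
    ToksArg Config.strictLinks ν tb k toks := by
  cases toks with
  | none => exact h
  | some ts => exact ⟨h.1, h.2.1, toks_frame h.2.2 h.2.1 he hlt⟩

/-- `tokens[j]` updated, for a natural index. -/
theorem tokUpd_nat (ts : Tokens) (j : Nat) (f : Token → Token) : tokUpd ts (j : Int) f = ts.set j (f (ts.getD j default)) := by
  unfold tokUpd tokAt
  have : ¬ ((j : Int) < 0) := by omega
  simp [this]

/-- `tokens[j]` read, for a natural index. -/
theorem tokAt_nat (ts : Tokens) (j : Nat) : tokAt ts (j : Int) = ts.getD j default := by
  unfold tokAt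
  have : ¬ ((j : Int) < 0) := by omega
  simp [this]

/-- The 32-bit pattern of an `int` field after `++`: whatever 64-bit word `w` the machine stores, if its low half is the old pattern plus one. -/
theorem holds32_inc_of {w raw : Nat} {x : Int} (hx : Holds32 raw x) (hw : w % 256 ^ 4 = (raw + 1) % 4294967296) :
    Holds32 (w % 256 ^ 4) (i32 (x + 1)) := by
  obtain ⟨hraw, hlo, hhi⟩ := hx
  rw [hw, hraw]
  have e : (u32 x + 1) % 4294967296 = u32 (i32 (x + 1)) := by unfold u32 i32; omega
  rw [e]
  exact holds32_of_range _ (i32_range _).1 (i32_range _).2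

/-- The address of `tokens[j]`, 20-byte records. -/
theorem tokAddr20 (tb : Word) (j : Nat) : tokAddr Config.strictLinks tb j = tb + UInt64.ofNat (20 * j) := by
  unfold tokAddr; rw [tokSize_strictLinks]

/-- **`tokens[j].size++`** as the three cases compile it (`cdqe ; lea rax,[rax+rax*4] ; lea rdx,[r13+rax*4] ; mov eax,[rdx+12] ; add eax,1 ;
mov [rdx+12],eax`): the array afterwards is the model's `tokUpd`. `w` is the word stored (its low half = the old size + 1). -/
theorem bump_tokens {μ : User.Mem} {tb : Word} {ts : Tokens} {j k w : Nat} (h : TokensAt Config.strictLinks μ tb ts) (hl : ts.length = k) (hj : j < k)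
    (hlt : tb.toNat + 20 * k < 2 ^ 64) (hw : w % 256 ^ 4 = (μ.readLE (tb + UInt64.ofNat (20 * j) + 12) 4 + 1) % 4294967296) :
    TokensAt Config.strictLinks (μ.writeLE (tb + UInt64.ofNat (20 * j) + 12) 4 w) tb
      (tokUpd ts (j : Int) fun t => { t with size := i32 (t.size + 1) }) := by
  rw [tokUpd_nat]
  have hjl : j < ts.length := hl ▸ hj
  have hmul := tokSize_mul_le Config.strictLinks hjl
  rw [tokSize_strictLinks] at hmul
  have ht0 := h.getD j hjl
  have haddr := tokAddr20 tb j
  refine TokensAt.update h hjl (by rw [tokSize_strictLinks, hl]; exact hlt) (by rw [tokSize_strictLinks]; v3_eqon)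
    (by rw [tokSize_strictLinks, hl]; v3_eqon) ?_
  rw [haddr] at ht0 ⊢
  have hsz := ht0.size
  have ht := ht0.type
  have hs := ht0.start
  have he := ht0.end
  have hpar := ht0.parent rfl
  refine ⟨by v3_frame ht, by v3_frame hs, by v3_frame he, holds32_read (by v3_read) (holds32_inc_of hsz hw), fun _ => by v3_frame hpar⟩

/-- `bumpSuper` without a superior token. -/
theorem bumpSuper_m1 {p : Parser} {toks : Option Tokens} (h : p.toksuper = -1) : bumpSuper p toks = toks := by
  cases toks <;> simp [bumpSuper, h]

/-- `bumpSuper` in counting mode. -/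
theorem bumpSuper_none {p : Parser} : bumpSuper p none = none := rfl

/-- `bumpSuper` with the superior token `j`. -/
theorem bumpSuper_some {p : Parser} {ts : Tokens} {j : Nat} (h : p.toksuper = j) :
    bumpSuper p (some ts) = some (tokUpd ts (j : Int) fun t => { t with size := i32 (t.size + 1) }) := by
  have : ¬ ((j : Int) = -1) := by omega
  simp [bumpSuper, h, this]

end A2
end S
end J6
end X86
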